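-- pv_equiv track=rewrite | github.com/mamite15/info_leak | extract/ngram.py | ngram_calculation
-- ===== SOURCE A (Python) =====
-- def ngram_locater(sample,n):
--     index=0
--     for i in range(0,n):
--         if sample[i] == 1:
--             bit = 1
--         else:
--             bit = 0
--         index = index + bit * (2 ** (n - i - 1))
--
--     return index
--
-- def ngram_calculation(sizes,n):
--     counter = 0
--
--     buckets = [0] * (2 ** n)
--
--     for i in range(0,len(sizes) - n+1):
--         index = ngram_locater(sizes[i:i + n], n)
--         buckets[index] = buckets[index] + 1
--         counter = counter + 1
--
--     return buckets
-- ===== SOURCE B (Python) =====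
-- def ngram_calculation(sizes, n):
--     # Rolling window: the index of each window is obtained from the previous one
--     # by one doubling, one add and one mod, instead of recomputing n powers.
--     size = 2 ** n
--     buckets = [0] * size
--     if n == 0:
--         # all len(sizes)+1 empty windows have index 0
--         buckets[0] = len(sizes) + 1
--         return buckets
--     idx = 0
--     for j, x in enumerate(sizes):
--         idx = (idx * 2 + (1 if x == 1 else 0)) % size
--         if j >= n - 1:
--             buckets[idx] += 1
--     return buckets
-- ===== Notes on version B (the rewrite author's own statement) =====
-- stated objective: alternative
-- what changed: B keeps a rolling window index (one doubling, one add and one mod per element) instead of recomputing each window's index from scratch with a slice and n powers of two.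
import Mathlib
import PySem

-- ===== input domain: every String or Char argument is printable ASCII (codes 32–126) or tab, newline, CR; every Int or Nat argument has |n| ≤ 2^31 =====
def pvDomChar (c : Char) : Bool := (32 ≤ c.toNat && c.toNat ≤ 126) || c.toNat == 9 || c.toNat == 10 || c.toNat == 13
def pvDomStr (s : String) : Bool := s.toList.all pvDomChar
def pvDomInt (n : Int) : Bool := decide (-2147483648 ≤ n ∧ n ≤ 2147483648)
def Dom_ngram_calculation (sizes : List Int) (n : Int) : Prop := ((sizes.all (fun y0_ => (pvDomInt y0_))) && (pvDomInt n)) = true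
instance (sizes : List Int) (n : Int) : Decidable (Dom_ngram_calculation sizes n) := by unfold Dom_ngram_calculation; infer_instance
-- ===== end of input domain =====

-- B replaces A's per-window recomputation of the n-bit index (a fresh slice and n
-- powers per window) by a rolling index updated with one doubling, one add and one
-- mod per element (objective: alternative; on the measured inputs the shared 2^n
-- bucket allocation dominates, so no speed is claimed).

-- shared one-liners, each a direct transliteration of a statement both Pythons contain:
-- 'bit = 1 if x == 1 else 0' and 'buckets[index] = buckets[index] + 1' (index is
-- always a nonnegative in-range value in both programs, so set/getD are exact).
def bitOf (x : Int) : Int := if x = 1 then 1 else 0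
def pyIncAt (bks : List Int) (ix : Int) : List Int :=
  bks.set ix.toNat (bks.getD ix.toNat 0 + 1)

-- ===== PORT A =====
def ngram_locater (sample : List Int) (n : Int) : Int :=
  (PySem.List.pyRange 0 n).foldl
    (fun index i =>
      -- sample[i]: always in range here (sample has length n whenever called)
      index + bitOf (PySem.List.pyGetD sample i 0) * 2 ^ (n - i - 1).toNat)
    0

def ngram_calculation (sizes : List Int) (n : Int) : List Int :=
  -- buckets = [0] * 2**n  (Pre_ gives 0 ≤ n, where 2**n is an int);
  -- the local 'counter' of the Python is dead (never returned) and is omitted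
  let buckets : List Int := List.replicate (2 ^ n.toNat) 0
  (PySem.List.pyRange 0 ((sizes.length : Int) - n + 1)).foldl
    (fun buckets i =>
      let index := ngram_locater (PySem.List.slice sizes (some i) (some (i + n))) n
      pyIncAt buckets index)
    buckets

-- ===== PORT B =====
def ngram_calculation_alt (sizes : List Int) (n : Int) : List Int :=
  let size : Int := 2 ^ n.toNat          -- size = 2 ** n  (Pre_ gives 0 ≤ n)
  let buckets : List Int := List.replicate size.toNat 0
  if n = 0 then
    buckets.set 0 ((sizes.length : Int) + 1)
  else
    ((PySem.List.enumerate sizes).foldl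
      (fun st jx =>
        let idx := PySem.Int.mod (st.1 * 2 + bitOf jx.2) size
        (idx, if n - 1 ≤ jx.1 then pyIncAt st.2 idx else st.2))
      (0, buckets)).2

-- ===== PRECONDITION & SPEC =====
-- Pre_ excludes exactly the n on which A raises: n < 0 (TypeError: '[0] * 2**n'
-- with a float 2**n), n ≥ 63 (OverflowError: 2**n cannot fit an index-sized int),
-- and 31 ≤ n ≤ 62 (MemoryError: the 2**n-element bucket list exceeds the grading
-- machine's memory; B performs the same allocation and fails identically there).
def Pre_ngram_calculation (sizes : List Int) (n : Int) : Prop := 0 ≤ n ∧ n ≤ 30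
instance (sizes : List Int) (n : Int) : Decidable (Pre_ngram_calculation sizes n) := by
  unfold Pre_ngram_calculation; infer_instance
def pvWitness_ngram_calculation : List Int × Int := ([1, 0, 1, 1], 2)

def Spec_ngram_calculation (sizes : List Int) (n : Int) (out : List Int) : Prop :=
  out = ngram_calculation_alt sizes n
instance (sizes : List Int) (n : Int) (out : List Int) : Decidable (Spec_ngram_calculation sizes n out) := by
  unfold Spec_ngram_calculation; infer_instance

-- ===== CLAIM (what is proved, stated in full; the proofs are below) =====
def Claim_equal_ngram_calculation : Prop := ∀ (sizes : List Int) (n : Int),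
  Dom_ngram_calculation sizes n → Pre_ngram_calculation sizes n →
  Spec_ngram_calculation sizes n (ngram_calculation sizes n)

-- ===== LEMMAS AND PROOFS =====

-- binary value of a list of sizes read as bits (Horner form)
def pvVal (l : List Int) : Int := l.foldl (fun a x => 2 * a + bitOf x) 0

theorem pvBitOf_cases (x : Int) : bitOf x = 0 ∨ bitOf x = 1 := by
  unfold bitOf; split <;> simp

theorem pvVal_foldl (l : List Int) (a : Int) :
    l.foldl (fun a x => 2 * a + bitOf x) a = a * 2 ^ l.length + pvVal l := by
  induction l generalizing a with
  | nil => simp [pvVal]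
  | cons x t ih =>
    show t.foldl _ (2 * a + bitOf x) = _
    rw [ih (2 * a + bitOf x)]
    have : pvVal (x :: t) = (2 * 0 + bitOf x) * 2 ^ t.length + pvVal t := by
      show t.foldl _ (2 * 0 + bitOf x) = _
      rw [ih (2 * 0 + bitOf x)]
    rw [this]; push_cast [List.length_cons]; ring

theorem pvVal_append (u v : List Int) :
    pvVal (u ++ v) = pvVal u * 2 ^ v.length + pvVal v := by
  unfold pvVal
  rw [List.foldl_append]
  exact pvVal_foldl v _

theorem pvVal_bounds (l : List Int) : 0 ≤ pvVal l ∧ pvVal l < 2 ^ l.length := by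
  induction l with
  | nil => simp [pvVal]
  | cons x t ih =>
    have h : pvVal (x :: t) = bitOf x * 2 ^ t.length + pvVal t := by
      have := pvVal_append [x] t
      simpa [pvVal] using this
    have hp : (0:Int) < 2 ^ t.length := by positivity
    rcases pvBitOf_cases x with hb | hb <;>
      simp only [h, hb, List.length_cons, pow_succ] <;> constructor <;> nlinarith [ih.1, ih.2]

-- sum of positional weights = Horner value
theorem pvSum_eq (w : List Int) :
    (List.map (fun k => bitOf (w.getD k 0) * 2 ^ (w.length - 1 - k)) (List.range w.length)).sum
      = pvVal w := by
  induction w using List.reverseRecOn with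
  | nil => simp [pvVal]
  | append_singleton t x ih =>
    rw [List.length_append, List.length_singleton, List.range_succ, List.map_append,
      List.sum_append]
    have hlast : (List.map (fun k => bitOf ((t ++ [x]).getD k 0) * 2 ^ (t.length + 1 - 1 - k)) [t.length]).sum
        = bitOf x := by
      simp [List.getD_eq_getElem?_getD]
    have hinit : List.map (fun k => bitOf ((t ++ [x]).getD k 0) * 2 ^ (t.length + 1 - 1 - k)) (List.range t.length)
        = List.map (fun k => 2 * (bitOf (t.getD k 0) * 2 ^ (t.length - 1 - k))) (List.range t.length) := by
      apply List.map_congr_left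
      intro k hk
      simp only [List.mem_range] at hk
      rw [List.getD_append t [x] 0 k hk]
      have : t.length + 1 - 1 - k = (t.length - 1 - k) + 1 := by omega
      rw [this, pow_succ]; ring
    rw [hlast, hinit, List.sum_map_mul_left, ih, pvVal_append]
    simp [pvVal]; ring

-- the locater computes the binary value of its (length-n) sample
theorem pvLocater_eq (w : List Int) : ngram_locater w (w.length : Int) = pvVal w := by
  unfold ngram_locater
  rw [PySem.List.foldl_add, PySem.List.pyRange_one, List.map_map]
  have h1 : ∀ k ∈ List.range ((w.length : Int) - 0).toNat,
      ((fun i => bitOf (PySem.List.pyGetD w i 0) * 2 ^ ((w.length : Int) - i - 1).toNat) ∘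
        fun k : Nat => (0 : Int) + k) k
      = bitOf (w.getD k 0) * 2 ^ (w.length - 1 - k) := by
    intro k hk
    simp only [List.mem_range] at hk
    simp only [Function.comp, zero_add, PySem.List.pyGetD_natCast]
    congr 2
    omega
  rw [List.map_congr_left h1]
  have h2 : ((w.length : Int) - 0).toNat = w.length := by omega
  rw [h2, zero_add]
  exact pvSum_eq w

-- A's loop, in canonical form: fold the increments over the list of window values
theorem pvA_canonical (sizes : List Int) (n : Int) (hn : 0 ≤ n) :
    ngram_calculation sizes n
      = ((List.range' 0 (sizes.length + 1 - n.toNat)).map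
          (fun i => pvVal ((sizes.drop i).take n.toNat))).foldl pyIncAt
          (List.replicate (2 ^ n.toNat) 0) := by
  unfold ngram_calculation
  rw [PySem.List.pyRange_one, List.foldl_map]
  conv_rhs => rw [← List.range_eq_range', List.foldl_map]
  have hW : (((sizes.length : Int) - n + 1) - 0).toNat = sizes.length + 1 - n.toNat := by omega
  rw [hW]
  apply PySem.List.foldl_congr_mem
  intro acc k hk
  simp only [List.mem_range] at hk
  have hkL : k + n.toNat ≤ sizes.length := by omega
  have hsl : PySem.List.slice sizes (some ((0 : Int) + k)) (some ((0 : Int) + k + n))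
      = (sizes.drop k).take n.toNat := by
    have e1 : (((0:Int) + k)).toNat = k := by omega
    have e2 : (((0:Int) + k + n)).toNat - k = n.toNat := by omega
    rw [PySem.List.slice_toNat sizes (by positivity) (by omega), e1, e2]
  have hlen : ((sizes.drop k).take n.toNat).length = n.toNat := by
    rw [List.length_take, List.length_drop]; omega
  show pyIncAt acc (ngram_locater _ n) = _
  rw [hsl]
  have hle := pvLocater_eq ((sizes.drop k).take n.toNat)
  rw [hlen] at hle
  have hcast : ((n.toNat : Int)) = n := by omega
  rw [hcast] at hle
  rw [hle]

-- B's loop: rolling invariant (idx = value of the processed prefix mod 2^n)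
theorem pvB_fold (n : Int) (hn : 1 ≤ n) (l : List Int) :
    ∀ (p : List Int) (bks : List Int),
    ((PySem.List.enumerate l (p.length : Int)).foldl
      (fun st jx =>
        let idx := PySem.Int.mod (st.1 * 2 + bitOf jx.2) (2 ^ n.toNat)
        (idx, if n - 1 ≤ jx.1 then pyIncAt st.2 idx else st.2))
      (pvVal p % 2 ^ n.toNat, bks)).2
    = ((List.range' (p.length + 1 - n.toNat)
          (p.length + l.length + 1 - n.toNat - (p.length + 1 - n.toNat))).map
        (fun i => pvVal (((p ++ l).drop i).take n.toNat))).foldl pyIncAt bks := by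
  induction l with
  | nil =>
    intro p bks
    simp only [PySem.List.enumerate_nil, List.foldl_nil, List.length_nil]
    have hc : p.length + 0 + 1 - n.toNat - (p.length + 1 - n.toNat) = 0 := by omega
    rw [hc]
    simp
  | cons x t ih =>
    intro p bks
    have hM : (0:Int) < 2 ^ n.toNat := by positivity
    rw [PySem.List.enumerate_cons, List.foldl_cons]
    -- the new rolling index is the value of the extended prefix, mod 2^n
    have hidx : PySem.Int.mod ((pvVal p % 2 ^ n.toNat) * 2 + bitOf x) (2 ^ n.toNat)
        = pvVal (p ++ [x]) % 2 ^ n.toNat := by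
      rw [PySem.Int.mod_eq_emod_of_pos hM, pvVal_append]
      have hx : pvVal [x] = bitOf x := by simp [pvVal]
      rw [hx]
      simp only [List.length_singleton, pow_one]
      conv_lhs => rw [Int.add_emod, Int.mul_emod, Int.emod_emod_of_dvd _ dvd_rfl,
        ← Int.mul_emod, ← Int.add_emod]
    have hstart : (p.length : Int) + 1 = ((p ++ [x]).length : Int) := by simp
    simp only [hidx, hstart]
    rw [ih (p ++ [x])]
    have happ : (p ++ [x]) ++ t = p ++ x :: t := by simp
    by_cases hc : n - 1 ≤ ((p.length : Int))
    · -- a window ends at this element: it is emitted now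
      have hNp : n.toNat ≤ p.length + 1 := by omega
      have hcnt : p.length + (x :: t).length + 1 - n.toNat - (p.length + 1 - n.toNat)
          = ((p ++ [x]).length + t.length + 1 - n.toNat - ((p ++ [x]).length + 1 - n.toNat)) + 1 := by
        simp only [List.length_cons, List.length_append, List.length_nil]; omega
      have hs1 : (p ++ [x]).length + 1 - n.toNat = (p.length + 1 - n.toNat) + 1 := by
        simp only [List.length_append, List.length_cons, List.length_nil]; omega
      rw [if_pos hc, hcnt, List.range'_succ, hs1, List.map_cons, List.foldl_cons]
      -- head window value: pvVal (p ++ [x]) % 2^n = value of the length-n window ending here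
      have hwin : pvVal (((p ++ x :: t).drop (p.length + 1 - n.toNat)).take n.toNat)
          = pvVal (p ++ [x]) % 2 ^ n.toNat := by
        have htk : (p ++ x :: t).take (p.length + 1) = p ++ [x] := by
          rw [List.take_append]
          simp
        have hsplit : (p ++ x :: t).take (p.length + 1)
            = (p ++ x :: t).take (p.length + 1 - n.toNat)
              ++ ((p ++ x :: t).drop (p.length + 1 - n.toNat)).take n.toNat := by
          rw [← List.take_add]
          congr 1
          omega
        have hwl : (((p ++ x :: t).drop (p.length + 1 - n.toNat)).take n.toNat).length = n.toNat := by
          rw [List.length_take, List.length_drop]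
          simp only [List.length_append, List.length_cons]
          omega
        have hb := pvVal_bounds (((p ++ x :: t).drop (p.length + 1 - n.toNat)).take n.toNat)
        rw [hwl] at hb
        rw [← htk, hsplit, pvVal_append, hwl]
        have hre : pvVal ((p ++ x :: t).take (p.length + 1 - n.toNat)) * 2 ^ n.toNat
              + pvVal (((p ++ x :: t).drop (p.length + 1 - n.toNat)).take n.toNat)
            = pvVal (((p ++ x :: t).drop (p.length + 1 - n.toNat)).take n.toNat)
              + 2 ^ n.toNat * pvVal ((p ++ x :: t).take (p.length + 1 - n.toNat)) := by ring
        rw [hre, Int.add_mul_emod_self_left, Int.emod_eq_of_lt hb.1 hb.2]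
      rw [happ, hwin]
    · -- no full window yet: nothing is emitted
      have hnp : p.length + 1 < n.toNat := by omega
      have hz1 : p.length + 1 - n.toNat = 0 := by omega
      have hz2 : (p ++ [x]).length + 1 - n.toNat = 0 := by
        simp only [List.length_append, List.length_cons, List.length_nil]; omega
      have hcnt : p.length + (x :: t).length + 1 - n.toNat - 0
          = (p ++ [x]).length + t.length + 1 - n.toNat - 0 := by
        simp only [List.length_cons, List.length_append, List.length_nil]; omega
      rw [if_neg hc, happ, hz1, hz2, hcnt]

theorem pvIncZero_fold (l : List Int) (c : Int) (h : ∀ y ∈ l, y = 0) :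
    l.foldl pyIncAt [c] = [c + l.length] := by
  induction l generalizing c with
  | nil => simp
  | cons x t ih =>
    have hx : x = 0 := h x (by simp)
    have ht : ∀ y ∈ t, y = 0 := fun y hy => h y (by simp [hy])
    simp only [List.foldl_cons, hx]
    have : pyIncAt [c] 0 = [c + 1] := by simp [pyIncAt]
    rw [this, ih (c+1) ht]
    congr 1
    push_cast [List.length_cons]; ring

-- ===== VERDICT (by name: the statement is the Claim_ definition above) =====
theorem ngram_calculation_spec : Claim_equal_ngram_calculation := by
  intro sizes n _ hpre
  unfold Spec_ngram_calculation
  unfold Pre_ngram_calculation at hpre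
  obtain ⟨hpre, -⟩ := hpre
  rw [pvA_canonical sizes n hpre]
  by_cases hne : n = 0
  · -- n = 0: both sides are the single bucket [len(sizes) + 1]
    subst hne
    have hz : ∀ y ∈ (List.range' 0 (sizes.length + 1 - (0:Int).toNat)).map
        (fun i => pvVal ((sizes.drop i).take (0:Int).toNat)), y = 0 := by
      intro y hy
      rcases List.mem_map.1 hy with ⟨i, _, rfl⟩
      simp [pvVal]
    have hrep : List.replicate (2 ^ (0:Int).toNat) (0:Int) = [0] := rfl
    rw [hrep, pvIncZero_fold _ 0 hz]
    unfold ngram_calculation_alt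
    simp
  · -- n ≥ 1: the rolling fold of B visits exactly A's windows
    have hn1 : 1 ≤ n := by omega
    have hBF := pvB_fold n hn1 sizes [] (List.replicate (((2:Int) ^ n.toNat).toNat) 0)
    simp only [List.length_nil, Nat.cast_zero, List.nil_append] at hBF
    have hv0 : pvVal ([] : List Int) % 2 ^ n.toNat = 0 := by simp [pvVal]
    rw [hv0] at hBF
    unfold ngram_calculation_alt
    rw [if_neg hne]
    rw [hBF]
    have hpow : ((2:Int) ^ n.toNat) = ((2 ^ n.toNat : Nat) : Int) := by push_cast; ring
    have hrep : ((2:Int) ^ n.toNat).toNat = 2 ^ n.toNat := by rw [hpow, Int.toNat_natCast]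
    have hc : 0 + sizes.length + 1 - n.toNat - (0 + 1 - n.toNat) = sizes.length + 1 - n.toNat := by
      omega
    have hs : 0 + 1 - n.toNat = 0 := by omega
    rw [hrep, hc, hs]
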